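-- pv_equiv track=rewrite | github.com/eoinohal/SDsquared_Python | accelerometer_data_processor.py | turning_points
-- ===== SOURCE A (Python) =====
-- def turning_points(array, acceptance):
--     # Returns all indexes of turning points in 1D array. Acceptance is the minimum change for turning point to be not considered vibration
--     idx_max, idx_min = [], []
--
--     NEUTRAL, RISING, FALLING = range(3)
--
--     def get_state(a, b):
--         if a > b and (a - b) > acceptance:
--             return RISING
--         if a < b and (b - a) > acceptance:
--             return FALLING
--         return NEUTRAL
--
--     ps = get_state(array[0], array[1])
--     begin = 1
--     for i in range(2, len(array)):
--         s = get_state(array[i - 1], array[i])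
--         if s != NEUTRAL:
--             if ps != NEUTRAL and ps != s:
--                 if s == FALLING:
--                     idx_max.append((begin + i - 1) // 2)
--                 else:
--                     idx_min.append((begin + i - 1) // 2)
--             begin = i
--             ps = s
--
--     return idx_min, idx_max
-- ===== SOURCE B (Python) =====
-- def turning_points(array, acceptance):
--     # Two-phase version: first collect significant transition events, then pair
--     # consecutive events to emit midpoints. Same return value as the one-pass version.
--     NEUTRAL, RISING, FALLING = range(3)
--
--     def get_state(a, b):
--         if a > b and (a - b) > acceptance:
--             return RISING
--         if a < b and (b - a) > acceptance:
--             return FALLING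
--         return NEUTRAL
--
--     events = [(1, get_state(array[0], array[1]))]
--     for i in range(2, len(array)):
--         s = get_state(array[i - 1], array[i])
--         if s != NEUTRAL:
--             events.append((i, s))
--
--     idx_max, idx_min = [], []
--     for (pi, ps), (ci, cs) in zip(events, events[1:]):
--         if ps != NEUTRAL and ps != cs:
--             if cs == FALLING:
--                 idx_max.append((pi + ci - 1) // 2)
--             else:
--                 idx_min.append((pi + ci - 1) // 2)
--     return idx_min, idx_max
-- ===== Notes on version B (the rewrite author's own statement) =====
-- stated objective: alternative
-- what changed: Replaces A's single stateful scan (carrying begin/ps across iterations) with two phases: one pass collecting significant transition events as (index,state) pairs, then a pairing pass over consecutive events that emits the midpoints.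
import Mathlib
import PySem

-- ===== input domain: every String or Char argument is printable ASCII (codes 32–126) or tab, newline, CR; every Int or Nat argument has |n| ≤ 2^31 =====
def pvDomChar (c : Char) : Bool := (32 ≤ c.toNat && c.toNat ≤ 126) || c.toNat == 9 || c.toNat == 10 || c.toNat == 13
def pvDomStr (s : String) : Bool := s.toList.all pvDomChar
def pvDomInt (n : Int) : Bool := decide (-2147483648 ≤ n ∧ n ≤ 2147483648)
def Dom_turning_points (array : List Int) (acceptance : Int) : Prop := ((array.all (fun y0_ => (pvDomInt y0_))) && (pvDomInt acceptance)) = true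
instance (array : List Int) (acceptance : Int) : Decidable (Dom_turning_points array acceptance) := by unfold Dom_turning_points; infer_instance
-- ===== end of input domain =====

-- B is an alternative decomposition: one pass collecting significant transition events,
-- then a pairing pass over consecutive events; same return value as A's stateful scan.

-- ===== PORT A =====
-- get_state: 0 = NEUTRAL, 1 = RISING, 2 = FALLING (range(3) values)
def tpState (acceptance a b : Int) : Int :=
  if a > b ∧ a - b > acceptance then 1
  else if a < b ∧ b - a > acceptance then 2
  else 0

-- array[i]; Python raises outside range, excluded by Pre_ (default 0 never read inside Pre_)
def tpGet (array : List Int) (i : Int) : Int :=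
  (PySem.List.pyGet? array i).getD 0

-- one iteration of A's for-loop; state = (idx_min, idx_max, begin, ps)
def tpAStep (array : List Int) (acceptance : Int)
    (st : List Int × List Int × Int × Int) (i : Int) : List Int × List Int × Int × Int :=
  let s := tpState acceptance (tpGet array (i - 1)) (tpGet array i)
  if s ≠ 0 then
    let upd :=
      if st.2.2.2 ≠ 0 ∧ st.2.2.2 ≠ s then
        if s = 2 then (st.1, st.2.1 ++ [PySem.Int.floordiv (st.2.2.1 + i - 1) 2])
        else (st.1 ++ [PySem.Int.floordiv (st.2.2.1 + i - 1) 2], st.2.1)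
      else (st.1, st.2.1)
    (upd.1, upd.2, i, s)
  else st

def turning_points (array : List Int) (acceptance : Int) : List Int × List Int :=
  let ps := tpState acceptance (tpGet array 0) (tpGet array 1)
  let res := (PySem.List.pyRange 2 array.length 1).foldl (tpAStep array acceptance) ([], [], 1, ps)
  (res.1, res.2.1)

-- ===== PORT B =====
-- append (i, s) when the transition at i is significant (first loop of Source B)
def tpEventStep (array : List Int) (acceptance : Int)
    (acc : List (Int × Int)) (i : Int) : List (Int × Int) :=
  let s := tpState acceptance (tpGet array (i - 1)) (tpGet array i)
  if s ≠ 0 then acc ++ [(i, s)] else acc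

-- one iteration of Source B's zip loop over consecutive event pairs
def tpPairStep (acc : List Int × List Int) (pr : (Int × Int) × (Int × Int)) : List Int × List Int :=
  if pr.1.2 ≠ 0 ∧ pr.1.2 ≠ pr.2.2 then
    if pr.2.2 = 2 then (acc.1, acc.2 ++ [PySem.Int.floordiv (pr.1.1 + pr.2.1 - 1) 2])
    else (acc.1 ++ [PySem.Int.floordiv (pr.1.1 + pr.2.1 - 1) 2], acc.2)
  else acc

def turning_points_alt (array : List Int) (acceptance : Int) : List Int × List Int :=
  let events := (PySem.List.pyRange 2 array.length 1).foldl (tpEventStep array acceptance)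
      [(1, tpState acceptance (tpGet array 0) (tpGet array 1))]
  (events.zip events.tail).foldl tpPairStep ([], [])

-- ===== PRECONDITION & SPEC =====
-- Pre_ excludes arrays of length < 2, on which Python A raises IndexError at array[1].
def Pre_turning_points (array : List Int) (acceptance : Int) : Prop := 2 ≤ array.length
instance (array : List Int) (acceptance : Int) : Decidable (Pre_turning_points array acceptance) := by unfold Pre_turning_points; infer_instance
def pvWitness_turning_points : List Int × Int := ([0, 5, 0, 6, 0], 1)

def Spec_turning_points (array : List Int) (acceptance : Int) (out : List Int × List Int) : Prop := out = turning_points_alt array acceptance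
instance (array : List Int) (acceptance : Int) (out : List Int × List Int) : Decidable (Spec_turning_points array acceptance out) := by unfold Spec_turning_points; infer_instance

-- ===== CLAIM (what is proved, stated in full; the proofs are below) =====
def Claim_equal_turning_points : Prop := ∀ (array : List Int) (acceptance : Int), Dom_turning_points array acceptance → Pre_turning_points array acceptance → Spec_turning_points array acceptance (turning_points array acceptance)

-- ===== LEMMAS AND PROOFS =====

-- the events fold is accumulator-homomorphic
lemma tpEvents_append (array : List Int) (acceptance : Int) :
    ∀ (L : List Int) (acc : List (Int × Int)),
      L.foldl (tpEventStep array acceptance) acc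
        = acc ++ L.foldl (tpEventStep array acceptance) [] := by
  intro L
  induction L with
  | nil => intro acc; simp
  | cons i L ih =>
    intro acc
    simp only [List.foldl_cons]
    rw [ih (tpEventStep array acceptance acc i), ih (tpEventStep array acceptance [] i)]
    unfold tpEventStep
    by_cases h : tpState acceptance (tpGet array (i - 1)) (tpGet array i) = 0 <;> simp [h]

-- main invariant: A's stateful fold equals B's pairing fold seeded with (begin, ps)
lemma tp_main (array : List Int) (acceptance : Int) :
    ∀ (L : List Int) (mn mx : List Int) (b p : Int),
      (let r := L.foldl (tpAStep array acceptance) (mn, mx, b, p); (r.1, r.2.1))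
        = (let ev := (b, p) :: L.foldl (tpEventStep array acceptance) [];
           (ev.zip ev.tail).foldl tpPairStep (mn, mx)) := by
  intro L
  induction L with
  | nil => intro mn mx b p; simp
  | cons i L ih =>
    intro mn mx b p
    simp only [List.foldl_cons]
    rw [tpEvents_append array acceptance L (tpEventStep array acceptance [] i)]
    by_cases hs : tpState acceptance (tpGet array (i - 1)) (tpGet array i) = 0
    · -- NEUTRAL step: both sides unchanged
      have hA : tpAStep array acceptance (mn, mx, b, p) i = (mn, mx, b, p) := by
        unfold tpAStep; simp [hs]
      have hE : tpEventStep array acceptance [] i = [] := by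
        unfold tpEventStep; simp [hs]
      rw [hA, hE, List.nil_append]
      exact ih mn mx b p
    · -- significant step: B consumes one pair, A updates its carried state
      have hE : tpEventStep array acceptance [] i
          = [(i, tpState acceptance (tpGet array (i - 1)) (tpGet array i))] := by
        unfold tpEventStep; simp [hs]
      set s := tpState acceptance (tpGet array (i - 1)) (tpGet array i) with hsdef
      have hA : tpAStep array acceptance (mn, mx, b, p) i
          = ((tpPairStep (mn, mx) ((b, p), (i, s))).1,
             (tpPairStep (mn, mx) ((b, p), (i, s))).2, i, s) := by
        unfold tpAStep tpPairStep
        simp [hs, ← hsdef]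
      rw [hA, hE]
      simp only [List.cons_append, List.nil_append, List.tail_cons, List.zip_cons_cons,
        List.foldl_cons]
      exact ih _ _ i s

-- ===== VERDICT (by name: the statement is the Claim_ definition above) =====
theorem turning_points_spec : Claim_equal_turning_points := by
  intro array acceptance _ _
  unfold Spec_turning_points turning_points turning_points_alt
  rw [tpEvents_append array acceptance (PySem.List.pyRange 2 array.length 1)
      [(1, tpState acceptance (tpGet array 0) (tpGet array 1))]]
  have h := tp_main array acceptance (PySem.List.pyRange 2 array.length 1)
      [] [] 1 (tpState acceptance (tpGet array 0) (tpGet array 1))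
  simpa using h
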